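-- pv_equiv track=rewrite | github.com/Aquaki/is-27 | PZ_10/pz_10_1.py | analyze_car_exports
-- ===== SOURCE A (Python) =====
-- def analyze_car_exports(domestic_cars, exports):
--     # Если нет данных об экспорте
--     if not exports:
--         return set(), set(), domestic_cars.copy()
--
--     # Получаем список всех стран
--     countries = list(exports.keys())
--
--     # Марки, экспортированные во все страны (пересечение всех множеств экспорта)
--     all_countries = set(exports[countries[0]])
--     for country in countries[1:]:
--         all_countries &= exports[country]  # Используем оператор & для пересечения
--
--     # Марки, экспортированные в некоторые страны (объединение всех множеств экспорта)
--     some_countries = set()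
--     for country in countries:
--         some_countries |= exports[country]  # Используем оператор | для объединения
--
--     # Марки, не экспортированные ни в одну страну
--     none_countries = domestic_cars - some_countries  # Используем оператор - для разности множеств
--
--     return all_countries, some_countries, none_countries
-- ===== SOURCE B (Python) =====
-- def analyze_car_exports(domestic_cars, exports):
--     # One frequency table instead of repeated set unions/intersections:
--     # a brand was exported to ALL countries iff its count equals len(exports).
--     n = len(exports)
--     counts = {}
--     for brands in exports.values():
--         for b in brands:
--             counts[b] = counts.get(b, 0) + 1
--     all_countries = {b for b, c in counts.items() if c == n}
--     some_countries = set(counts)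
--     none_countries = {b for b in domestic_cars if b not in counts}
--     return all_countries, some_countries, none_countries
-- ===== Notes on version B (the rewrite author's own statement) =====
-- stated objective: alternative
-- what changed: Replaces the two set-algebra folds (intersection of all export sets, then union of all export sets) by a single pass that builds one brand->count frequency table, reading 'exported to all countries' off as count == len(exports) and 'some'/'none' off the table's keys.
import Mathlib
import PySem

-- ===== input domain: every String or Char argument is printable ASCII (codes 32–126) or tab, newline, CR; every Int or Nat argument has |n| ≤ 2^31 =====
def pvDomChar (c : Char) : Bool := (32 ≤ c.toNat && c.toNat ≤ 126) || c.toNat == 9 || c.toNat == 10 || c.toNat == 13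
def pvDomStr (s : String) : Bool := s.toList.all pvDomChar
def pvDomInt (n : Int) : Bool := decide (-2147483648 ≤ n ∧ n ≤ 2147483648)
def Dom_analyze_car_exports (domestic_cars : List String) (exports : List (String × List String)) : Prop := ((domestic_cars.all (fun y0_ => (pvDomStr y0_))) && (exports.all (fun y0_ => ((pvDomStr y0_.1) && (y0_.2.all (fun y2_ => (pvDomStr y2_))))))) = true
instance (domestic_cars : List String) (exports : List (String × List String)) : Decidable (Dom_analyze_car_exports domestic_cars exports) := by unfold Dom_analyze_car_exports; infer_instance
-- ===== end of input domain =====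

-- B replaces A's set-algebra folds (intersection, then union, over all export sets) by one brand->count
-- frequency table read off against len(exports); same cost, different decomposition ("alternative").

-- ===== PORT A =====
def analyze_car_exports (domestic_cars : List String) (exports : List (String × List String)) : List String × List String × List String :=
  match exports with
  | [] => ([], [], domestic_cars)
  | _ :: _ =>
    let d : PySem.Dict String (List String) := PySem.Dict.mk exports
    let countries := exports.map Prod.fst                -- list(exports.keys())
    -- all_countries = set(exports[countries[0]]); then &= over countries[1:]
    let all_countries := (countries.drop 1).foldl
      (fun acc c => PySem.Set.inter acc (d.getD c []))
      (PySem.Set.ofList (d.getD (countries.headD "") []))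
    -- some_countries = set(); then |= over countries
    let some_countries := countries.foldl
      (fun acc c => PySem.Set.union acc (d.getD c [])) PySem.Set.empty
    -- none_countries = domestic_cars - some_countries  (domestic_cars is a Python set)
    let none_countries := PySem.Set.diff domestic_cars some_countries
    (all_countries, some_countries, none_countries)

-- ===== PORT B =====
def analyze_car_exports_alt (domestic_cars : List String) (exports : List (String × List String)) : List String × List String × List String :=
  let n : Int := exports.length
  -- counts[b] = counts.get(b, 0) + 1 over every brand of every country
  let counts : PySem.Dict String Int :=
    exports.foldl (fun d p => p.2.foldl (fun d b => d.modify b 0 (· + 1)) d) PySem.Dict.empty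
  let all_countries := (counts.items.filter (fun p => p.2 == n)).map Prod.fst
  let some_countries := counts.keys
  let none_countries := domestic_cars.filter (fun b => !(counts.contains b))
  (all_countries, some_countries, none_countries)

-- ===== PRECONDITION & SPEC =====
-- Pre_ only rules out argument lists that no Python call can produce: `exports` is a dict whose values
-- are sets, so its keys and the elements inside each value must be duplicate-free.
def Pre_analyze_car_exports (domestic_cars : List String) (exports : List (String × List String)) : Prop :=
  (exports.map Prod.fst).Nodup ∧ ∀ p ∈ exports, p.2.Nodup
instance (domestic_cars : List String) (exports : List (String × List String)) : Decidable (Pre_analyze_car_exports domestic_cars exports) := by unfold Pre_analyze_car_exports; infer_instance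

def pvWitness_analyze_car_exports : List String × (List (String × List String)) :=
  (["lada", "bmw"], [("ru", ["lada", "kia"]), ("de", ["kia"])])

def Spec_analyze_car_exports (domestic_cars : List String) (exports : List (String × List String)) (out : List String × List String × List String) : Prop := out = analyze_car_exports_alt domestic_cars exports
instance (domestic_cars : List String) (exports : List (String × List String)) (out : List String × List String × List String) : Decidable (Spec_analyze_car_exports domestic_cars exports out) := by unfold Spec_analyze_car_exports; infer_instance

-- ===== CLAIM (what is proved, stated in full; the proofs are below) =====
def Claim_equal_analyze_car_exports : Prop := ∀ (domestic_cars : List String) (exports : List (String × List String)), Dom_analyze_car_exports domestic_cars exports → Pre_analyze_car_exports domestic_cars exports → Spec_analyze_car_exports domestic_cars exports (analyze_car_exports domestic_cars exports)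

-- ===== LEMMAS AND PROOFS =====

-- B's nested counting loop is Counter(all brands flattened)
lemma counts_eq_counter (exports : List (String × List String)) :
    exports.foldl (fun d p => p.2.foldl (fun d b => d.modify b 0 (· + 1)) d) PySem.Dict.empty
      = PySem.Dict.counter (exports.flatMap Prod.snd) := by
  simp [PySem.Dict.counter, List.foldl_flatMap]

-- dict lookup of a key of the assoc list, keys unique
lemma lookup_eq (exports : List (String × List String)) (h : (exports.map Prod.fst).Nodup)
    (p : String × List String) (hp : p ∈ exports) :
    (PySem.Dict.mk exports).getD p.1 [] = p.2 := by
  obtain ⟨k, v⟩ := p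
  exact PySem.Dict.getD_of_mem_items (PySem.Dict.mk exports) hp h []

-- A's union fold
lemma foldl_union_eq (exports : List (String × List String)) (s : PySem.Set String) :
    exports.foldl (fun acc p => PySem.Set.union acc p.2) s
      = s.update (exports.flatMap Prod.snd) := by
  induction exports generalizing s with
  | nil => simp [PySem.Set.update]
  | cons q t ih =>
    rw [List.foldl_cons, ih, List.flatMap_cons, PySem.Set.update_append]
    rfl

-- A's intersection fold
lemma foldl_inter_eq (vs : List (List String)) (s : List String) :
    vs.foldl PySem.Set.inter s = s.filter (fun x => vs.all (fun v => v.contains x)) := by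
  induction vs generalizing s with
  | nil => simp
  | cons v t ih =>
    simp only [List.foldl_cons, ih, PySem.Set.inter, List.filter_filter, List.all_cons]
    apply List.filter_congr
    intro x _
    simp [Bool.and_comm]

-- count of one element over the flattened sets is at most the number of countries
lemma count_flat_le (exports : List (String × List String)) (h : ∀ p ∈ exports, p.2.Nodup)
    (x : String) : (exports.flatMap Prod.snd).count x ≤ exports.length := by
  induction exports with
  | nil => simp
  | cons q t ih =>
    have h1 : q.2.count x ≤ 1 := List.nodup_iff_count_le_one.mp (h q (by simp)) x
    have h2 := ih (fun p hp => h p (by simp [hp]))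
    simp only [List.flatMap_cons, List.count_append, List.length_cons]
    omega

-- count equals the number of countries iff the brand is in every country's set
lemma count_flat_eq_iff (exports : List (String × List String)) (h : ∀ p ∈ exports, p.2.Nodup)
    (x : String) :
    (exports.flatMap Prod.snd).count x = exports.length ↔ ∀ p ∈ exports, x ∈ p.2 := by
  induction exports with
  | nil => simp
  | cons q t ih =>
    have h1 : q.2.count x ≤ 1 := List.nodup_iff_count_le_one.mp (h q (by simp)) x
    have h2 := count_flat_le t (fun p hp => h p (by simp [hp])) x
    have h3 := ih (fun p hp => h p (by simp [hp]))
    have h4 : x ∈ q.2 ↔ q.2.count x = 1 := by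
      constructor
      · intro hx; have := List.count_pos_iff.mpr hx; omega
      · intro hc; exact List.count_pos_iff.mp (by omega)
    simp only [List.flatMap_cons, List.count_append, List.length_cons, List.forall_mem_cons]
    constructor
    · intro he; constructor
      · exact h4.mpr (by omega)
      · exact h3.mp (by omega)
    · rintro ⟨hq, ht⟩
      have := h4.mp hq
      have := h3.mpr ht
      omega


-- the count-based filter of B equals A's first-set-filtered-by-the-rest
lemma all_component (c0 : String) (v0 : List String) (rest : List (String × List String))
    (h : ∀ p ∈ (c0, v0) :: rest, p.2.Nodup) :
    (PySem.Set.ofList (((c0, v0) :: rest).flatMap Prod.snd)).filter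
        (fun k => ((((c0, v0) :: rest).flatMap Prod.snd).count k : Int)
          == ((((c0, v0) :: rest).length : Nat) : Int))
      = (PySem.Set.ofList v0).filter
          (fun x => (rest.map Prod.snd).all (fun v => v.contains x)) := by
  have hv0 : v0.Nodup := h (c0, v0) (by simp)
  have hrest : ∀ p ∈ rest, p.2.Nodup := fun p hp => h p (by simp [hp])
  have hsplit : ((c0, v0) :: rest).flatMap Prod.snd = v0 ++ rest.flatMap Prod.snd := by simp
  rw [hsplit, PySem.Set.ofList_append, PySem.Set.ofList_eq_self_of_nodup v0 hv0,
    PySem.Set.update_eq_append_filter, List.filter_append]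
  have hnil :
      ((PySem.Set.ofList (rest.flatMap Prod.snd)).filter
          (fun y => !PySem.Set.contains v0 y)).filter
        (fun k => (((v0 ++ rest.flatMap Prod.snd).count k : Nat) : Int)
          == ((((c0, v0) :: rest).length : Nat) : Int)) = [] := by
    rw [List.filter_filter, List.filter_eq_nil_iff]
    intro a _
    have hle := count_flat_le rest hrest a
    by_cases hm : a ∈ v0
    · simp [PySem.Set.contains_eq_listContains, hm]
    · have h0 : v0.count a = 0 := List.count_eq_zero.mpr hm
      simp only [Bool.and_eq_true, beq_iff_eq, not_and, Int.natCast_inj, List.count_append,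
        List.length_cons, Bool.not_eq_eq_eq_not, Bool.not_true]
      intro h1 h2
      rw [h0] at *
      omega
  rw [hnil, List.append_nil]
  apply List.filter_congr
  intro x hx
  rw [Bool.eq_iff_iff]
  have hiff := count_flat_eq_iff ((c0, v0) :: rest) h x
  simp only [List.flatMap_cons] at hiff
  simp only [beq_iff_eq, Int.natCast_inj, hiff, List.all_eq_true, List.forall_mem_cons,
    List.mem_map, List.contains_iff_mem]
  constructor
  · rintro ⟨_, hr⟩ v ⟨p, hp, rfl⟩
    exact hr p hp
  · intro hal
    exact ⟨hx, fun p hp => hal p.2 ⟨p, hp, rfl⟩⟩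

theorem analyze_car_exports_spec : Claim_equal_analyze_car_exports := by
  intro domestic_cars exports _hdom hpre
  obtain ⟨hkeys, hvals⟩ := hpre
  unfold Spec_analyze_car_exports
  match exports with
  | [] =>
    simp [analyze_car_exports, analyze_car_exports_alt, PySem.Dict.empty,
      PySem.Dict.keys, PySem.Dict.contains]
  | (c0, v0) :: rest =>
    simp only [analyze_car_exports, analyze_car_exports_alt, counts_eq_counter]
    set L := (((c0, v0) :: rest).flatMap Prod.snd) with hL
    have hn := hvals
    -- the three lookups return the stored value lists
    have hlook : ∀ p ∈ (c0, v0) :: rest, (PySem.Dict.mk ((c0, v0) :: rest)).getD p.1 [] = p.2 :=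
      fun p hp => lookup_eq _ hkeys p hp
    have hlook0 : (PySem.Dict.mk ((c0, v0) :: rest)).getD c0 [] = v0 := hlook (c0, v0) (by simp)
    -- some_countries: both sides are set(ofList of all brands in order)
    have hsome :
        (((c0, v0) :: rest).map Prod.fst).foldl
            (fun acc c => PySem.Set.union acc ((PySem.Dict.mk ((c0, v0) :: rest)).getD c []))
            PySem.Set.empty
          = PySem.Set.ofList L := by
      rw [List.foldl_map,
        PySem.List.foldl_congr_mem _ _ (fun acc p => PySem.Set.union acc p.2) _
          (fun acc p hp => by rw [hlook p hp]),
        foldl_union_eq]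
      rfl
    -- all_countries, A side: first list filtered by membership in every later list
    have hallA :
        ((((c0, v0) :: rest).map Prod.fst).drop 1).foldl
            (fun acc c => PySem.Set.inter acc ((PySem.Dict.mk ((c0, v0) :: rest)).getD c []))
            (PySem.Set.ofList ((PySem.Dict.mk ((c0, v0) :: rest)).getD
              ((((c0, v0) :: rest).map Prod.fst).headD "") []))
          = (PySem.Set.ofList v0).filter
              (fun x => (rest.map Prod.snd).all (fun v => v.contains x)) := by
      have hd : (((c0, v0) :: rest).map Prod.fst).drop 1 = rest.map Prod.fst := by simp
      have hh : (((c0, v0) :: rest).map Prod.fst).headD "" = c0 := by simp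
      rw [hd, hh, hlook0, List.foldl_map,
        PySem.List.foldl_congr_mem _ _ (fun acc p => PySem.Set.inter acc p.2) _
          (fun acc p hp => by rw [hlook p (by simp [hp])]),
        ← List.foldl_map (f := Prod.snd) (g := PySem.Set.inter),
        foldl_inter_eq]
    rw [hsome, hallA, PySem.Dict.items_counter, List.filter_map, List.map_map]
    simp only [Prod.mk.injEq]
    refine ⟨?_, ?_, ?_⟩
    · simp only [Function.comp_def, List.map_id']
      exact (all_component c0 v0 rest hvals).symm
    · rw [PySem.Dict.keys_counter]
    · apply List.filter_congr
      intro b _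
      simp [PySem.Dict.contains_counter]
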